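-- pv_equiv track=rewrite | github.com/PhucGiaNguyen99/W5_Principles_Of_Computings | W5_Greedy_Boss.py | greedy_boss
-- ===== SOURCE A (Python) =====
-- STANDARD = True
--
-- INITIAL_SALARY = 100
--
-- SALARY_INCREMENT = 100
--
-- INITIAL_BRIBE_COST = 1000
--
-- def greedy_boss(days_in_simulation, bribe_cost_increment, plot_type=STANDARD):
--     """
--     Simulation of the greedy boss
--     """
--
--     # initialize the necessary varibles
--     current_day = 0
--     bribe_times = 0
--     total_salary = 0
--     current_saving = 0
--     current_salary = INITIAL_SALARY
--     current_bribe = INITIAL_BRIBE_COST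
--
--     # initialize the list consisting of days and total salary earned for analysis
--     days_vs_earnings = [(0, 0)]
--
--     while current_day <= days_in_simulation:
--
--         # check whether we have enough savings to bribe without waiting
--         if current_saving < current_bribe:
--             current_saving += current_salary
--             total_salary += current_salary
--             current_day += 1
--         else:
--             current_saving -= current_bribe  # purchase current bribe
--             current_salary += SALARY_INCREMENT
--             current_bribe += bribe_cost_increment
--             days_vs_earnings.append((current_day, total_salary))
--             # current_day += 1
--     return days_vs_earnings
-- ===== SOURCE B (Python) =====
-- STANDARD = True
--
-- INITIAL_SALARY = 100
--
-- SALARY_INCREMENT = 100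
--
-- INITIAL_BRIBE_COST = 1000
--
-- def greedy_boss(days_in_simulation, bribe_cost_increment, plot_type=STANDARD):
--     """Event-driven greedy-boss simulation: instead of earning one day at a
--     time, jump ahead by the exact number of days needed to afford the next
--     bribe (ceiling division), so the loop runs once per event, not per day."""
--     current_day = 0
--     total_salary = 0
--     current_saving = 0
--     current_salary = INITIAL_SALARY
--     current_bribe = INITIAL_BRIBE_COST
--     days_vs_earnings = [(0, 0)]
--     while current_day <= days_in_simulation:
--         if current_saving >= current_bribe:
--             # affordable now: buy the bribe immediately (day does not advance)
--             current_saving -= current_bribe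
--             current_salary += SALARY_INCREMENT
--             current_bribe += bribe_cost_increment
--             days_vs_earnings.append((current_day, total_salary))
--         else:
--             # jump straight to the day the next bribe becomes affordable
--             # (capped by the end of the simulation)
--             needed = current_bribe - current_saving
--             wait = -(-needed // current_salary)  # ceiling division
--             remaining = days_in_simulation - current_day + 1
--             if wait > remaining:
--                 wait = remaining
--             current_saving += wait * current_salary
--             total_salary += wait * current_salary
--             current_day += wait
--     return days_vs_earnings
-- ===== Notes on version B (the rewrite author's own statement) =====
-- stated objective: faster
-- what changed: A advances the simulation one day per loop iteration; B is event-driven: it computes by ceiling division how many days are needed to afford the next bribe and jumps ahead that many days in one step, so the loop runs once per bribe/wait event instead of once per day.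
-- outside the precondition, e.g. on greedy_boss(5, -1, True): A returns [(0, 0)], B returns [(0, 0)]
import Mathlib
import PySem

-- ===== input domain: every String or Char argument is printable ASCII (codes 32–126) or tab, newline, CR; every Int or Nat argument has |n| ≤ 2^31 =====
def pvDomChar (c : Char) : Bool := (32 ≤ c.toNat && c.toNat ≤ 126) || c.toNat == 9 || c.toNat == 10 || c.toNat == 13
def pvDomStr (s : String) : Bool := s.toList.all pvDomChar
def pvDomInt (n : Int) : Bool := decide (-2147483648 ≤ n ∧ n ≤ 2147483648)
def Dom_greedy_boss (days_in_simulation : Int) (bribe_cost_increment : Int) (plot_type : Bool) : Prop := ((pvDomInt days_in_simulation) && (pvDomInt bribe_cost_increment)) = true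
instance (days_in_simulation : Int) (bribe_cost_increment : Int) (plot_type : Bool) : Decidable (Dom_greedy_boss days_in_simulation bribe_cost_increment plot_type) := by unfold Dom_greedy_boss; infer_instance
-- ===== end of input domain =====

-- B replaces A's per-day while loop by an event loop that jumps ahead by a
-- ceiling division to the day the next bribe becomes affordable (per-event
-- instead of per-day iteration).

-- ===== PORT A =====
-- A's while loop, one iteration per step; the 'bribe ≤ 0' early exit is a
-- totality guard only (under Pre_, bribe stays ≥ 1000, so it never fires;
-- in Python A would loop forever there).
def greedyLoopA (days inc : Int) (day total saving salary bribe : Int)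
    (acc : List (Int × Int)) : List (Int × Int) :=
  if h : day ≤ days then
    if saving < bribe then
      greedyLoopA days inc (day + 1) (total + salary) (saving + salary) salary bribe acc
    else if hb : bribe ≤ 0 then acc
    else
      greedyLoopA days inc day total (saving - bribe) (salary + 100) (bribe + inc)
        (acc ++ [(day, total)])
  else acc
termination_by ((days - day + 1).toNat, saving.toNat)
decreasing_by
  · left; omega
  · right; omega

def greedy_boss (days_in_simulation : Int) (bribe_cost_increment : Int) (plot_type : Bool) : List (Int × Int) :=
  greedyLoopA days_in_simulation bribe_cost_increment 0 0 0 100 1000 [(0, 0)]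

-- ===== PORT B =====
-- B's event loop: a bribe step is as in A; a waiting phase is collapsed into
-- one jump of 'wait' days, wait = min(ceil(needed/salary), remaining).
-- The 'bribe ≤ 0 / wait ≤ 0' early exits are totality guards only (under
-- Pre_, bribe ≥ 1000 and salary ≥ 100 keep them false; in Python B would
-- loop forever on bribe ≤ 0, and wait ≥ 1 always holds).
def greedyLoopB (days inc : Int) (day total saving salary bribe : Int)
    (acc : List (Int × Int)) : List (Int × Int) :=
  if h : day ≤ days then
    if saving ≥ bribe then
      if hb : bribe ≤ 0 then acc
      else
        greedyLoopB days inc day total (saving - bribe) (salary + 100) (bribe + inc)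
          (acc ++ [(day, total)])
    else
      -- wait = min(ceil(needed/salary), remaining), exactly Python's
      -- 'wait = -(-needed // salary); if wait > remaining: wait = remaining'
      if hw : min (-(PySem.Int.floordiv (-(bribe - saving)) salary)) (days - day + 1) ≤ 0 then acc
      else
        greedyLoopB days inc
          (day + min (-(PySem.Int.floordiv (-(bribe - saving)) salary)) (days - day + 1))
          (total + min (-(PySem.Int.floordiv (-(bribe - saving)) salary)) (days - day + 1) * salary)
          (saving + min (-(PySem.Int.floordiv (-(bribe - saving)) salary)) (days - day + 1) * salary)
          salary bribe acc
  else acc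
termination_by ((days - day + 1).toNat, saving.toNat)
decreasing_by
  · right; omega
  · left
    have h1 := min_le_right (-(PySem.Int.floordiv (-(bribe - saving)) salary)) (days - day + 1)
    omega

def greedy_boss_alt (days_in_simulation : Int) (bribe_cost_increment : Int) (plot_type : Bool) : List (Int × Int) :=
  greedyLoopB days_in_simulation bribe_cost_increment 0 0 0 100 1000 [(0, 0)]

-- ===== PRECONDITION & SPEC =====
-- Pre_ excludes negative bribe_cost_increment: there the bribe cost can drop
-- to ≤ 0, after which both A and B loop forever (no value is returned); on
-- the few negative-increment inputs small enough for A to still return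
-- (e.g. days_in_simulation ≤ 9), B returns the same value anyway.
def Pre_greedy_boss (days_in_simulation : Int) (bribe_cost_increment : Int) (plot_type : Bool) : Prop :=
  0 ≤ bribe_cost_increment
instance (days_in_simulation : Int) (bribe_cost_increment : Int) (plot_type : Bool) : Decidable (Pre_greedy_boss days_in_simulation bribe_cost_increment plot_type) := by unfold Pre_greedy_boss; infer_instance

def pvWitness_greedy_boss : Int × Int × Bool := (30, 500, true)

def Spec_greedy_boss (days_in_simulation : Int) (bribe_cost_increment : Int) (plot_type : Bool) (out : List (Int × Int)) : Prop := out = greedy_boss_alt days_in_simulation bribe_cost_increment plot_type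
instance (days_in_simulation : Int) (bribe_cost_increment : Int) (plot_type : Bool) (out : List (Int × Int)) : Decidable (Spec_greedy_boss days_in_simulation bribe_cost_increment plot_type out) := by unfold Spec_greedy_boss; infer_instance

-- ===== CLAIM (what is proved, stated in full; the proofs are below) =====
def Claim_equal_greedy_boss : Prop := ∀ (days_in_simulation : Int) (bribe_cost_increment : Int) (plot_type : Bool), Dom_greedy_boss days_in_simulation bribe_cost_increment plot_type → Pre_greedy_boss days_in_simulation bribe_cost_increment plot_type → Spec_greedy_boss days_in_simulation bribe_cost_increment plot_type (greedy_boss days_in_simulation bribe_cost_increment plot_type)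

-- ===== LEMMAS AND PROOFS =====

-- One worked day of the event loop: while the next bribe is unaffordable,
-- jumping 'wait' days from day equals working one day and jumping from day+1.
theorem loopB_work_step (days inc day total saving salary bribe : Int)
    (acc : List (Int × Int)) (hday : day ≤ days) (hsb : saving < bribe) (hsal : 0 < salary) :
    greedyLoopB days inc day total saving salary bribe acc
      = greedyLoopB days inc (day + 1) (total + salary) (saving + salary) salary bribe acc := by
  obtain ⟨hW1, hW2⟩ :=
    (PySem.Int.neg_floordiv_neg_eq_iff_of_pos (a := bribe - saving)
      (q := -(PySem.Int.floordiv (-(bribe - saving)) salary)) hsal).mp rfl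
  rw [greedyLoopB, dif_pos hday, if_neg (not_le.mpr hsb)]
  set W := -(PySem.Int.floordiv (-(bribe - saving)) salary) with hWdef
  have hWpos : 1 ≤ W := by nlinarith
  set m := min W (days - day + 1) with hmdef
  have hm1 : 1 ≤ m := by omega
  rw [dif_neg (show ¬ m ≤ 0 by omega)]
  by_cases hm : m = 1
  · rw [hm]; norm_num
  · -- m ≥ 2: both W ≥ 2 and days remaining ≥ 2; unfold the right-hand side once
    have hW2' : 2 ≤ W := by omega
    have hR2 : day + 1 ≤ days := by omega
    have hsb' : saving + salary < bribe := by nlinarith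
    have hWnext : -(PySem.Int.floordiv (-(bribe - (saving + salary))) salary) = W - 1 :=
      (PySem.Int.neg_floordiv_neg_eq_iff_of_pos hsal).mpr ⟨by nlinarith, by nlinarith⟩
    have hmm : min (W - 1) (days - (day + 1) + 1) = m - 1 := by omega
    conv_rhs => rw [greedyLoopB]
    rw [dif_pos hR2, if_neg (not_le.mpr hsb'), hWnext, hmm,
      dif_neg (show ¬ m - 1 ≤ 0 by omega)]
    have e1 : day + 1 + (m - 1) = day + m := by ring
    have e2 : total + salary + (m - 1) * salary = total + m * salary := by ring
    have e3 : saving + salary + (m - 1) * salary = saving + m * salary := by ring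
    rw [e1, e2, e3]

-- Main invariant lemma: with nonnegative increment, positive salary and
-- positive bribe, the per-day loop and the event loop compute the same list.
theorem loopA_eq_loopB (days inc : Int) (hinc : 0 ≤ inc) :
    ∀ day total saving salary bribe acc, 0 ≤ saving → 0 < salary → 0 < bribe →
      greedyLoopA days inc day total saving salary bribe acc
        = greedyLoopB days inc day total saving salary bribe acc := by
  intro day total saving salary bribe acc
  fun_induction greedyLoopA days inc day total saving salary bribe acc with
  | case1 day total saving salary bribe acc h hsb ih =>
    intro hs hsal hb
    rw [ih (by omega) hsal hb]
    exact (loopB_work_step days inc day total saving salary bribe acc h hsb hsal).symm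
  | case2 day total saving salary bribe acc h hsb hbneg =>
    intro hs hsal hb
    exact absurd hb (by omega)
  | case3 day total saving salary bribe acc h hsb hbneg ih =>
    intro hs hsal hb
    rw [ih (by omega) (by omega) (by omega)]
    conv_rhs => rw [greedyLoopB]
    rw [dif_pos h, if_pos (show saving ≥ bribe by omega), dif_neg hbneg]
  | case4 day total saving salary bribe acc h =>
    intro hs hsal hb
    conv_rhs => rw [greedyLoopB]
    rw [dif_neg h]

theorem greedy_boss_spec : Claim_equal_greedy_boss := by
  intro d inc pt _ hpre
  unfold Spec_greedy_boss greedy_boss greedy_boss_alt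
  exact loopA_eq_loopB d inc hpre 0 0 0 100 1000 [(0,0)] (by norm_num) (by norm_num) (by norm_num)
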